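-- pv_equiv track=rewrite | github.com/ulysse-lacour/Cultplace-app | utils/utils.py | list_to_element_counted_and_sorted_dict
-- ===== SOURCE A (Python) =====
-- from typing import Dict, List
--
-- def list_to_element_counted_and_sorted_dict(my_raw_list: List[str]) -> Dict:
--     '''
--       Takes a list of element, counts each element and
--       return a dict of key = element, value = number of occurence,
--       sorted from greater occcurences to lower
--     '''
--     my_counted_list = {
--         element: my_raw_list.count(element)
--         for element in my_raw_list
--     }
--     my_ordered_dict = {
--         key: value
--         for key, value in sorted(
--             my_counted_list.items(),
--             key=lambda item: item[1],
--             reverse=True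
--         )
--     }
--     return my_ordered_dict
-- ===== SOURCE B (Python) =====
-- from typing import Dict, List
--
-- def list_to_element_counted_and_sorted_dict(my_raw_list: List[str]) -> Dict:
--     # One pass to count, then bucket elements by count and emit buckets
--     # from the highest count down (first-appearance order within a bucket).
--     counts = {}
--     for element in my_raw_list:
--         counts[element] = counts.get(element, 0) + 1
--     if not counts:
--         return {}
--     buckets = {}
--     for key, value in counts.items():
--         buckets.setdefault(value, []).append(key)
--     out = {}
--     for c in range(max(counts.values()), 0, -1):
--         for key in buckets.get(c, ()):
--             out[key] = c
--     return out
-- ===== Notes on version B (the rewrite author's own statement) =====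
-- stated objective: faster
-- what changed: Replaces the quadratic count-per-element comprehension plus a comparison sort with a single counting pass followed by bucketing elements by count and emitting buckets from the maximum count down.
import Mathlib
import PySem

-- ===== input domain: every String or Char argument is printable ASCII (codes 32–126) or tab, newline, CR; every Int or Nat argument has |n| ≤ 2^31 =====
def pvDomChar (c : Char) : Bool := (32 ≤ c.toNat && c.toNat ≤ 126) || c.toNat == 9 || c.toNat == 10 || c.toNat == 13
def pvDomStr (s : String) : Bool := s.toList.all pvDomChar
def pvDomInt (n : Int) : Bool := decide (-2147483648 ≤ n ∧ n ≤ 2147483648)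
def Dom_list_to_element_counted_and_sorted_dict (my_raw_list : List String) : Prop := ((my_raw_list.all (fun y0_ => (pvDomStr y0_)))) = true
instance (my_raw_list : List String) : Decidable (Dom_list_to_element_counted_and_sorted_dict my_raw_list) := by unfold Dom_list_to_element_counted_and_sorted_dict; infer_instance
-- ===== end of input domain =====

-- B counts in one pass, buckets elements by their count, and emits buckets from the
-- maximum count downwards, instead of A's quadratic count-per-element dict plus a sort.

-- ===== PORT A =====
def list_to_element_counted_and_sorted_dict (my_raw_list : List String) : List (String × Int) :=
  -- my_counted_list = {element: my_raw_list.count(element) for element in my_raw_list}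
  let my_counted_list : PySem.Dict String Int :=
    my_raw_list.foldl (fun d element => d.insert element (PySem.List.count my_raw_list element : Int)) PySem.Dict.empty
  -- my_ordered_dict = {k: v for k, v in sorted(items, key=lambda item: item[1], reverse=True)}
  let my_ordered_dict : PySem.Dict String Int :=
    (PySem.List.sorted my_counted_list.items (fun item => item.2) true).foldl
      (fun d kv => d.insert kv.1 kv.2) PySem.Dict.empty
  my_ordered_dict.items

-- ===== PORT B =====
def list_to_element_counted_and_sorted_dict_alt (my_raw_list : List String) : List (String × Int) :=
  -- counts[element] = counts.get(element, 0) + 1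
  let counts : PySem.Dict String Int :=
    my_raw_list.foldl (fun d element => d.insert element (d.getD element 0 + 1)) PySem.Dict.empty
  -- if not counts: return {}
  if counts.items = [] then []
  else
    -- buckets.setdefault(value, []).append(key)  ==  buckets[value] = buckets.get(value, []) + [key]
    let buckets : PySem.Dict Int (List String) :=
      counts.items.foldl (fun b kv => b.modify kv.2 [] (fun ks => ks ++ [kv.1])) PySem.Dict.empty
    -- for c in range(max(counts.values()), 0, -1): for key in buckets.get(c, ()): out[key] = c
    match PySem.List.max? counts.values (fun y => y) with
    | none => []   -- unreachable: counts is nonempty here (totality guard for max())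
    | some m =>
      let out : PySem.Dict String Int :=
        (PySem.List.pyRange m 0 (-1)).foldl
          (fun d c => (buckets.getD c []).foldl (fun d key => d.insert key c) d) PySem.Dict.empty
      out.items

-- ===== PRECONDITION & SPEC =====
def Spec_list_to_element_counted_and_sorted_dict (my_raw_list : List String) (out : List (String × Int)) : Prop := out = list_to_element_counted_and_sorted_dict_alt my_raw_list
instance (my_raw_list : List String) (out : List (String × Int)) : Decidable (Spec_list_to_element_counted_and_sorted_dict my_raw_list out) := by unfold Spec_list_to_element_counted_and_sorted_dict; infer_instance

-- ===== CLAIM (what is proved, stated in full; the proofs are below) =====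
def Claim_equal_list_to_element_counted_and_sorted_dict : Prop := ∀ (my_raw_list : List String), Dom_list_to_element_counted_and_sorted_dict my_raw_list → Spec_list_to_element_counted_and_sorted_dict my_raw_list (list_to_element_counted_and_sorted_dict my_raw_list)

-- ===== LEMMAS AND PROOFS =====

-- insertBy walks past a block of elements it does not go before
theorem pv_insertBy_append_left {α : Type} (before : α → α → Bool) (x : α) (A B : List α)
    (hA : ∀ a ∈ A, before x a = false) :
    PySem.List.insertBy before x (A ++ B) = A ++ PySem.List.insertBy before x B := by
  induction A with
  | nil => simp
  | cons a A ih =>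
    have ha := hA a (by simp)
    simp only [List.cons_append, PySem.List.insertBy, ha]
    simp only [Bool.false_eq_true, if_false]
    rw [ih (fun a ha' => hA a (by simp [ha']))]

-- insertBy inserts exactly between the "not before" prefix and the "before" suffix
theorem pv_insertBy_split {α : Type} (before : α → α → Bool) (x : α) (A B : List α)
    (hA : ∀ a ∈ A, before x a = false) (hB : ∀ b ∈ B, before x b = true) :
    PySem.List.insertBy before x (A ++ B) = A ++ [x] ++ B := by
  rw [pv_insertBy_append_left before x A B hA]
  cases B with
  | nil => simp [PySem.List.insertBy]
  | cons b B => simp [PySem.List.insertBy, hB b (by simp)]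

-- inserting a pair with key v into a concatenation of strictly-descending buckets
theorem pv_insertBy_flatMap {α : Type} (key : α → Int) (x : α) (cs : List Int) (g : Int → List α)
    (hdesc : cs.Pairwise (· > ·)) (hmem : key x ∈ cs)
    (hg : ∀ c ∈ cs, ∀ p ∈ g c, key p = c) :
    PySem.List.insertBy (fun a b => decide (key b < key a)) x (cs.flatMap g)
      = cs.flatMap (fun c => g c ++ if key x == c then [x] else []) := by
  induction cs with
  | nil => simp at hmem
  | cons c cs ih =>
    have hlt : ∀ b ∈ cs, b < c := fun b hb => (List.pairwise_cons.mp hdesc).1 b hb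
    simp only [List.flatMap_cons]
    by_cases hc : key x = c
    · -- x lands at the end of bucket c; all later buckets have strictly smaller keys
      have h1 : ∀ a ∈ g c, (fun a b => decide (key b < key a)) x a = false := by
        intro a ha
        simp [hg c (by simp) a ha, hc]
      have h2 : ∀ b ∈ cs.flatMap g, (fun a b => decide (key b < key a)) x b = true := by
        intro b hb
        simp only [List.mem_flatMap] at hb
        obtain ⟨c', hc', hb'⟩ := hb
        simp [hg c' (by simp [hc']) b hb', hc, hlt c' hc']
      rw [pv_insertBy_split _ x (g c) (cs.flatMap g) h1 h2]
      have hrest : cs.flatMap (fun c' => g c' ++ if key x == c' then [x] else []) = cs.flatMap g := by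
        apply List.flatMap_congr
        intro c' hc'
        have hne : ¬ (key x = c') := by have := hlt c' hc'; omega
        simp [hne]
      rw [hrest]
      simp [hc]
    · -- x's key is strictly below c: walk past bucket c
      have hmem' : key x ∈ cs := by
        rcases List.mem_cons.mp hmem with h | h
        · exact absurd h hc
        · exact h
      have hxc : key x < c := hlt _ hmem'
      have h1 : ∀ a ∈ g c, (fun a b => decide (key b < key a)) x a = false := by
        intro a ha
        simp [hg c (by simp) a ha]
        omega
      rw [pv_insertBy_append_left _ x (g c) (cs.flatMap g) h1]
      rw [ih (List.pairwise_cons.mp hdesc).2 hmem' (fun c' hc' => hg c' (by simp [hc']))]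
      have : (if key x == c then [x] else []) = ([] : List α) := by simp [hc]
      rw [this, List.append_nil]

-- THE HEART: a stable descending sort by an Int key in [1, m] IS the concatenation of
-- the per-key filters taken from m down to 1.
theorem pv_sorted_rev_eq_buckets {α : Type} (xs : List α) (key : α → Int) (m : Int)
    (h : ∀ p ∈ xs, 1 ≤ key p ∧ key p ≤ m) :
    PySem.List.sorted xs key true
      = (PySem.List.pyRange m 0 (-1)).flatMap (fun c => xs.filter (fun p => key p == c)) := by
  induction xs using List.reverseRecOn with
  | nil => simp [PySem.List.sorted]
  | append_singleton xs x ih =>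
    have hx := h x (by simp)
    have hdesc : (PySem.List.pyRange m 0 (-1)).Pairwise (· > ·) := by
      rw [PySem.List.pyRange_neg_one_eq_reverse]
      rw [List.pairwise_reverse]
      exact PySem.List.pairwise_lt_pyRange_one 1 (m + 1)
    have hmem : key x ∈ PySem.List.pyRange m 0 (-1) := by
      rw [PySem.List.mem_pyRange_neg_one]; omega
    rw [PySem.List.sorted_rev_eq_foldl_insertBy, List.foldl_append, List.foldl_cons, List.foldl_nil,
        ← PySem.List.sorted_rev_eq_foldl_insertBy]
    rw [ih (fun p hp => h p (by simp [hp]))]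
    rw [pv_insertBy_flatMap key x _ _ hdesc hmem
        (fun c _ p hp => by simpa using (List.mem_filter.mp hp).2)]
    apply List.flatMap_congr
    intro c _
    rw [List.filter_append]
    by_cases hxc : key x = c <;> simp [hxc]

-- getD of a fold that places each key's count, by last write
theorem pv_getD_foldl_insert_const (l : List String) (f : String → Int) (d : PySem.Dict String Int)
    (k : String) (v0 : Int) :
    (l.foldl (fun d e => d.insert e (f e)) d).getD k v0
      = if k ∈ l then f k else d.getD k v0 := by
  induction l generalizing d with
  | nil => simp
  | cons a l ih =>
    simp only [List.foldl_cons, ih]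
    by_cases hk : k ∈ l
    · simp [hk]
    · by_cases hka : k = a
      · simp [hka, PySem.Dict.getD_insert_self]
      · rw [PySem.Dict.getD_insert_of_ne d (f a) v0 hka]; simp [hk, hka]

-- A's counting comprehension has the same items as Counter(l)
theorem pv_countedA_items (l : List String) :
    (l.foldl (fun d e => d.insert e (PySem.List.count l e : Int)) PySem.Dict.empty).items
      = (PySem.Set.ofList l).map (fun k => (k, (l.count k : Int))) := by
  set d := l.foldl (fun d e => d.insert e (PySem.List.count l e : Int)) PySem.Dict.empty with hd
  have hkeys : d.keys = PySem.Set.ofList l := by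
    rw [hd, PySem.Dict.keys_foldl_insert]
    simp only [PySem.Dict.keys_empty]
    rw [PySem.Set.update_nil_left]
  have hnd : d.keys.Nodup := hkeys ▸ PySem.Set.nodup_ofList l
  rw [PySem.Dict.items_eq_map_keys d hnd 0, hkeys]
  apply List.map_congr_left
  intro k hk
  have hkl : k ∈ l := (PySem.Set.mem_ofList l k).mp hk
  rw [hd, pv_getD_foldl_insert_const l _ PySem.Dict.empty k 0, if_pos hkl]
  rw [PySem.List.count_eq]

-- a fold of inserts with pairwise-distinct keys from empty just lists the pairs
theorem pv_items_foldl_insert_pairs (l : List (String × Int)) (hnd : (l.map Prod.fst).Nodup) :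
    (l.foldl (fun d kv => d.insert kv.1 kv.2) PySem.Dict.empty).items = l := by
  have := PySem.Dict.items_foldl_insert_fresh (l := l) (k := Prod.fst) (v := Prod.snd)
    (d := PySem.Dict.empty) (by intro a _; simp) hnd
  simpa using this

-- loop-shape reassociations for B's nested folds
theorem pv_inner_fold (c : Int) (ks : List String) (d : PySem.Dict String Int) :
    ks.foldl (fun d k => d.insert k c) d
      = (ks.map (fun k => (k, c))).foldl (fun d p => d.insert p.1 p.2) d := by
  induction ks generalizing d <;> simp [*]

theorem pv_swap_fold (ps : List (String × Int)) (b : PySem.Dict Int (List String)) :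
    ps.foldl (fun b kv => b.modify kv.2 [] (fun ks => ks ++ [kv.1])) b
      = (ps.map Prod.swap).foldl (fun b q => b.modify q.1 [] (fun ks => ks ++ [q.2])) b := by
  induction ps generalizing b <;> simp [*]

theorem pv_outer_fold (cs : List Int) (g : Int → List (String × Int)) (d : PySem.Dict String Int) :
    cs.foldl (fun d c => (g c).foldl (fun d p => d.insert p.1 p.2) d) d
      = (cs.flatMap g).foldl (fun d p => d.insert p.1 p.2) d := by
  induction cs generalizing d <;> simp [*]

-- A's result is the stable descending sort of the first-appearance (element, count) pairs
theorem pv_A_eq (l : List String) :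
    list_to_element_counted_and_sorted_dict l
      = PySem.List.sorted ((PySem.Set.ofList l).map (fun k => (k, (l.count k : Int))))
          (fun p => p.2) true := by
  have hI : ((PySem.Set.ofList l).map (fun k => (k, (l.count k : Int)))).map Prod.fst
      = PySem.Set.ofList l := by
    simp [List.map_map, Function.comp_def]
  simp only [list_to_element_counted_and_sorted_dict]
  rw [pv_countedA_items l]
  apply pv_items_foldl_insert_pairs
  have hperm := (PySem.List.sorted_perm
    ((PySem.Set.ofList l).map (fun k => (k, (l.count k : Int)))) (fun p => p.2) true).map Prod.fst
  rw [hI] at hperm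
  exact hperm.nodup_iff.mpr (PySem.Set.nodup_ofList l)

-- B's result is the same stable descending sort, via the buckets
theorem pv_B_eq (l : List String) (hl : l ≠ []) :
    list_to_element_counted_and_sorted_dict_alt l
      = PySem.List.sorted ((PySem.Set.ofList l).map (fun k => (k, (l.count k : Int))))
          (fun p => p.2) true := by
  have hitems : (l.foldl (fun d e => d.insert e (d.getD e 0 + 1)) PySem.Dict.empty).items
      = (PySem.Set.ofList l).map (fun k => (k, (l.count k : Int))) := by
    rw [PySem.Dict.foldl_insert_getD_add_one_eq_counter, PySem.Dict.items_counter]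
  set I := (PySem.Set.ofList l).map (fun k => (k, (l.count k : Int))) with hIdef
  -- I is nonempty
  obtain ⟨p, Ir, hIcons⟩ : ∃ p Ir, I = p :: Ir := by
    cases hS : PySem.Set.ofList l with
    | nil =>
      obtain ⟨x, t, rfl⟩ : ∃ x t, l = x :: t := by
        cases l with
        | nil => exact absurd rfl hl
        | cons x t => exact ⟨x, t, rfl⟩
      have : x ∈ PySem.Set.ofList (x :: t) := (PySem.Set.mem_ofList _ _).mpr (by simp)
      rw [hS] at this; simp at this
    | cons k S' => exact ⟨_, _, by rw [hIdef, hS, List.map_cons]⟩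
  simp only [list_to_element_counted_and_sorted_dict_alt]
  rw [hitems, hIcons, if_neg (by simp)]
  -- values of the counter
  have hvals : (l.foldl (fun d e => d.insert e (d.getD e 0 + 1)) PySem.Dict.empty).values
      = p.2 :: Ir.map (fun q => q.2) := by
    simp only [PySem.Dict.values, hitems, hIcons, List.map_cons]
  rw [hvals, PySem.List.max?_id_cons]
  set m := (Ir.map (fun q => q.2)).foldl max p.2 with hm
  -- key bounds
  have hub : ∀ q ∈ I, q.2 ≤ m := by
    intro q hq
    rw [hIcons] at hq
    rcases List.mem_cons.mp hq with h | h
    · rw [h]; exact (PySem.List.le_foldl_max (Ir.map (fun q => q.2)) p.2).1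
    · exact (PySem.List.le_foldl_max (Ir.map (fun q => q.2)) p.2).2 q.2 (List.mem_map_of_mem h)
  have hlb : ∀ q ∈ I, 1 ≤ q.2 := by
    intro q hq
    rw [hIdef] at hq
    obtain ⟨k, hk, rfl⟩ := List.mem_map.mp hq
    have : 0 < l.count k := List.count_pos_iff.mpr ((PySem.Set.mem_ofList l k).mp hk)
    simpa using this
  -- buckets
  have hbucket : ∀ c : Int,
      (I.foldl (fun b kv => b.modify kv.2 [] (fun ks => ks ++ [kv.1])) PySem.Dict.empty).getD c []
        = (I.filter (fun q => q.2 == c)).map (fun q => q.1) := by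
    intro c
    rw [pv_swap_fold, PySem.Dict.getD_foldl_modify_append]
    rw [List.filter_map, List.map_map]
    simp [Function.comp_def, Prod.swap]
  -- the output fold
  rw [hIcons] at hbucket hub hlb
  show (List.foldl
      (fun d c =>
        List.foldl (fun d key => d.insert key c) d
          ((List.foldl (fun b kv => b.modify kv.2 [] fun ks => ks ++ [kv.1]) PySem.Dict.empty
              (p :: Ir)).getD c []))
      PySem.Dict.empty (PySem.List.pyRange m 0 (-1))).items
    = PySem.List.sorted (p :: Ir) (fun p => p.2) true
  have hfold :
      List.foldl
        (fun d c =>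
          List.foldl (fun d key => d.insert key c) d
            ((List.foldl (fun b kv => b.modify kv.2 [] fun ks => ks ++ [kv.1]) PySem.Dict.empty
                (p :: Ir)).getD c []))
        PySem.Dict.empty (PySem.List.pyRange m 0 (-1))
      = List.foldl
        (fun d c =>
          ((((p :: Ir).filter (fun q => q.2 == c)).map (fun q => q.1)).map
            (fun k => (k, c))).foldl (fun d q => d.insert q.1 q.2) d)
        PySem.Dict.empty (PySem.List.pyRange m 0 (-1)) :=
    PySem.List.foldl_congr_mem _ _ _ _ (by intro d c _; rw [hbucket c, pv_inner_fold])
  rw [hfold, pv_outer_fold]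
  have hg : (PySem.List.pyRange m 0 (-1)).flatMap
      (fun c => (((p :: Ir).filter (fun q => q.2 == c)).map (fun q => q.1)).map (fun k => (k, c)))
      = (PySem.List.pyRange m 0 (-1)).flatMap (fun c => (p :: Ir).filter (fun q => q.2 == c)) := by
    apply List.flatMap_congr
    intro c _
    rw [List.map_map]
    have : ∀ q ∈ (p :: Ir).filter (fun q => q.2 == c),
        ((fun k => (k, c)) ∘ fun q => q.1) q = q := by
      intro q hq
      have := (List.mem_filter.mp hq).2
      simp only [beq_iff_eq] at this
      simp [← this]
    rw [List.map_congr_left this, List.map_id']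
  rw [hg]
  have hsorted := pv_sorted_rev_eq_buckets (p :: Ir) (fun q => q.2) m
    (fun q hq => ⟨hlb q hq, hub q hq⟩)
  rw [← hsorted]
  apply pv_items_foldl_insert_pairs
  have hperm := (PySem.List.sorted_perm (p :: Ir) (fun q => q.2) true).map Prod.fst
  have hI : (p :: Ir).map Prod.fst = PySem.Set.ofList l := by
    rw [← hIcons, hIdef]; simp [List.map_map, Function.comp_def]
  rw [hI] at hperm
  exact hperm.nodup_iff.mpr (PySem.Set.nodup_ofList l)

-- ===== VERDICT (by name: the statement is the Claim_ definition above) =====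
theorem list_to_element_counted_and_sorted_dict_spec : Claim_equal_list_to_element_counted_and_sorted_dict := by
  intro l _
  unfold Spec_list_to_element_counted_and_sorted_dict
  by_cases hl : l = []
  · subst hl; rfl
  · rw [pv_A_eq l, pv_B_eq l hl]
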